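-- pv_equiv track=rewrite | github.com/LangloisClement/AOC2023 | main.py | calcNextValue
-- ===== SOURCE A (Python) =====
-- def calcNextValue(listValues: list[int]):
--     flagRec = False
--     for value in listValues:
--         if value != 0:
--             flagRec = True
--             break
--     if not flagRec:
--         return 0
--     ecartValues = [listValues[i+1]-listValues[i]
--                    for i in range(len(listValues)-1)]
--     r = listValues[-1]+calcNextValue(ecartValues)
--     return r
-- ===== SOURCE B (Python) =====
-- def calcNextValue(listValues: list[int]):
--     # Closed form: next = sum_{k=1}^{n} (-1)^(k+1) * C(n,k) * listValues[n-k],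
--     # with the binomial coefficient maintained incrementally in one O(n) pass.
--     n = len(listValues)
--     total = 0
--     c = 1
--     sign = 1
--     for k in range(1, n + 1):
--         c = c * (n - k + 1) // k
--         total += sign * c * listValues[n - k]
--         sign = -sign
--     return total
-- ===== Notes on version B (the rewrite author's own statement) =====
-- stated objective: faster
-- what changed: Replaces the recursive finite-difference pyramid with a single pass evaluating the closed-form alternating binomial-coefficient sum, the coefficient C(n,k) maintained incrementally by exact multiply/divide.
import Mathlib
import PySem

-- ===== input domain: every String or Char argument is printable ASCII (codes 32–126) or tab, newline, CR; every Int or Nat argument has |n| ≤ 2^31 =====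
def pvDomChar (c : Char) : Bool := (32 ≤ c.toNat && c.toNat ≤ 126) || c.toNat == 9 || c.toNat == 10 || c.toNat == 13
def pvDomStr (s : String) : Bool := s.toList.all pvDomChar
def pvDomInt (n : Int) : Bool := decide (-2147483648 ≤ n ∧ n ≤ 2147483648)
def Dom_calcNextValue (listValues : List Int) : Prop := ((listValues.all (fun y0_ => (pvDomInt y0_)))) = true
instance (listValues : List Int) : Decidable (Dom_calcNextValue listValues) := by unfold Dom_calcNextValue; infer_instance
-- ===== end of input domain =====

-- B replaces A's recursive difference pyramid by a one-pass closed-form binomial sum (objective: faster).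

-- ===== PORT A =====
-- Literal port of A. The loop searching for a nonzero value with break is the Bool
-- `List.any`; indices i, i+1 in the comprehension are always in range 0..len-1, so
-- `getD` is exact there; listValues[-1] is PySem.List.pyGetD (list nonempty when taken).
def calcNextValue (listValues : List Int) : Int :=
  if h : listValues.any (fun value => value != 0) then
    let ecartValues := (List.range (listValues.length - 1)).map
      (fun i => listValues.getD (i + 1) 0 - listValues.getD i 0)
    PySem.List.pyGetD listValues (-1) 0 + calcNextValue ecartValues
  else 0
termination_by listValues.length
decreasing_by
  simp only [List.length_map, List.length_range]
  cases listValues with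
  | nil => simp at h
  | cons a t => simp

-- ===== PORT B =====
-- Literal port of Source B: one pass k = 1..n, carrying (total, c, sign).
def calcNextValue_alt (listValues : List Int) : Int :=
  let n := listValues.length
  let s := (PySem.List.pyRange 1 ((n : Int) + 1) 1).foldl
    (fun (s : Int × Int × Int) k =>
      let c := PySem.Int.floordiv (s.2.1 * ((n : Int) - k + 1)) k
      (s.1 + s.2.2 * c * PySem.List.pyGetD listValues ((n : Int) - k) 0, c, -s.2.2))
    (0, 1, 1)
  s.1

-- ===== PRECONDITION & SPEC =====
def Spec_calcNextValue (listValues : List Int) (out : Int) : Prop := out = calcNextValue_alt listValues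
instance (listValues : List Int) (out : Int) : Decidable (Spec_calcNextValue listValues out) := by unfold Spec_calcNextValue; infer_instance

-- ===== CLAIM (what is proved, stated in full; the proofs are below) =====
def Claim_equal_calcNextValue : Prop := ∀ (listValues : List Int), Dom_calcNextValue listValues → Spec_calcNextValue listValues (calcNextValue listValues)

-- ===== LEMMAS AND PROOFS =====

-- The common closed form: next value = Σ_{k<n} (-1)^k · C(n,k+1) · xs[n-1-k].
def binomSum (xs : List Int) : Int :=
  ∑ k ∈ Finset.range xs.length,
    (-1 : ℤ) ^ k * (xs.length.choose (k + 1) : ℤ) * xs.getD (xs.length - 1 - k) 0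

lemma getD_all_zero (xs : List Int) (h : ∀ v ∈ xs, v = 0) (i : ℕ) : xs.getD i 0 = 0 := by
  rcases hx : xs[i]? with _ | v
  · simp [List.getD, hx]
  · simp [List.getD, hx]
    exact h v (List.mem_of_getElem? hx)

lemma binomSum_all_zero (xs : List Int) (h : ∀ v ∈ xs, v = 0) : binomSum xs = 0 := by
  unfold binomSum
  refine Finset.sum_eq_zero fun k _ => ?_
  rw [getD_all_zero xs h, mul_zero]

-- element of the difference list
lemma dif_getD (xs : List Int) (m k : ℕ) (hn : xs.length = m + 1) (hk : k < m) :
    ((List.range (xs.length - 1)).map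
      (fun i => xs.getD (i + 1) 0 - xs.getD i 0)).getD (m - 1 - k) 0
    = xs.getD (m - k) 0 - xs.getD (m - 1 - k) 0 := by
  have hlt : m - 1 - k < m := by omega
  have : (m - 1 - k) + 1 = m - k := by omega
  simp [hn, List.getD, hlt, this]

-- key recurrence: for nonempty xs, binomSum xs = last + binomSum (diff xs)
lemma binomSum_rec (xs : List Int) (hne : xs ≠ []) :
    binomSum xs
      = PySem.List.pyGetD xs (-1) 0
        + binomSum ((List.range (xs.length - 1)).map
            (fun i => xs.getD (i + 1) 0 - xs.getD i 0)) := by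
  obtain ⟨m, hn⟩ : ∃ m, xs.length = m + 1 := by
    cases xs with
    | nil => exact absurd rfl hne
    | cons a t => exact ⟨t.length, by simp⟩
  set b : ℕ → ℤ := fun k => xs.getD (m - k) 0 with hb
  have hlast : PySem.List.pyGetD xs (-1) 0 = b 0 := by
    rw [PySem.List.pyGetD_neg_one xs 0 hne, List.getLast_eq_getElem]
    simp [hb, hn, List.getD]
  have hdlen : ((List.range (xs.length - 1)).map
      (fun i => xs.getD (i + 1) 0 - xs.getD i 0)).length = m := by
    simp [hn]
  -- rewrite both binomSums as explicit range sums over b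
  have hL : binomSum xs
      = ∑ k ∈ Finset.range (m + 1),
          (-1 : ℤ) ^ k * ((m + 1).choose (k + 1) : ℤ) * b k := by
    unfold binomSum
    rw [hn]
    refine Finset.sum_congr rfl fun k hk => ?_
    have : m + 1 - 1 - k = m - k := by omega
    rw [this]
  have hR : binomSum ((List.range (xs.length - 1)).map
      (fun i => xs.getD (i + 1) 0 - xs.getD i 0))
      = ∑ k ∈ Finset.range m,
          (-1 : ℤ) ^ k * (m.choose (k + 1) : ℤ) * (b k - b (k + 1)) := by
    unfold binomSum
    rw [hdlen]
    refine Finset.sum_congr rfl fun k hk => ?_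
    have hk' : k < m := Finset.mem_range.mp hk
    rw [dif_getD xs m k hn hk']
    have : m - (k + 1) = m - 1 - k := by omega
    simp [hb, this]
  rw [hL, hR, hlast]
  -- now pure algebra over Finset.range sums
  have pascal : ∀ k ∈ Finset.range (m + 1),
      (-1 : ℤ) ^ k * ((m + 1).choose (k + 1) : ℤ) * b k
      = (-1 : ℤ) ^ k * (m.choose k : ℤ) * b k
        + (-1 : ℤ) ^ k * (m.choose (k + 1) : ℤ) * b k := by
    intro k _
    rw [Nat.choose_succ_succ]
    push_cast
    ring
  rw [Finset.sum_congr rfl pascal, Finset.sum_add_distrib]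
  -- first summand: peel the k = 0 term
  rw [Finset.sum_range_succ' (fun k => (-1 : ℤ) ^ k * (m.choose k : ℤ) * b k) m]
  -- second summand: last term (k = m) vanishes since choose m (m+1) = 0
  rw [Finset.sum_range_succ (fun k => (-1 : ℤ) ^ k * (m.choose (k + 1) : ℤ) * b k) m]
  rw [Nat.choose_succ_self]
  have hsplit : ∑ k ∈ Finset.range m,
      (-1 : ℤ) ^ k * (m.choose (k + 1) : ℤ) * (b k - b (k + 1))
      = ∑ k ∈ Finset.range m, ((-1 : ℤ) ^ k * (m.choose (k + 1) : ℤ) * b k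
          - (-1 : ℤ) ^ k * (m.choose (k + 1) : ℤ) * b (k + 1)) := by
    refine Finset.sum_congr rfl fun k _ => ?_
    ring
  rw [hsplit, Finset.sum_sub_distrib]
  have hshift : ∑ k ∈ Finset.range m,
      (-1 : ℤ) ^ (k + 1) * (m.choose (k + 1) : ℤ) * b (k + 1)
      = - ∑ k ∈ Finset.range m, (-1 : ℤ) ^ k * (m.choose (k + 1) : ℤ) * b (k + 1) := by
    rw [← Finset.sum_neg_distrib]
    refine Finset.sum_congr rfl fun k _ => ?_
    ring
  rw [hshift]
  simp only [Nat.choose_zero_right, Nat.cast_one]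
  push_cast
  ring

-- A computes the closed form
lemma calcNextValue_eq_binomSum (xs : List Int) : calcNextValue xs = binomSum xs := by
  have H : ∀ (n : ℕ) (xs : List Int), xs.length = n → calcNextValue xs = binomSum xs := by
    intro n
    induction n using Nat.strong_induction_on with
    | _ n ihn =>
      intro xs hn
      by_cases h : xs.any (fun value => value != 0)
      · have hne : xs ≠ [] := by
          cases xs with
          | nil => simp at h
          | cons a t => simp
        have hpos : 0 < xs.length := List.length_pos_iff.mpr hne
        rw [calcNextValue, dif_pos h]
        show PySem.List.pyGetD xs (-1) 0
            + calcNextValue ((List.range (xs.length - 1)).map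
                (fun i => xs.getD (i + 1) 0 - xs.getD i 0)) = binomSum xs
        rw [ihn (xs.length - 1) (by omega)
              ((List.range (xs.length - 1)).map
                (fun i => xs.getD (i + 1) 0 - xs.getD i 0)) (by simp),
            binomSum_rec xs hne]
      · rw [calcNextValue, dif_neg h]
        have hz : ∀ v ∈ xs, v = 0 := by
          intro v hv
          by_contra hvne
          exact h (List.any_eq_true.mpr ⟨v, hv, by simpa using hvne⟩)
        rw [binomSum_all_zero xs hz]
  exact H xs.length xs rfl

-- B's loop invariant: after iterations k = 1..j the state is
-- (partial closed-form sum, C(n,j), (-1)^j).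
lemma alt_inv (xs : List Int) (j : ℕ) (hj : j ≤ xs.length) :
    (PySem.List.pyRange 1 ((j : Int) + 1) 1).foldl
      (fun (s : Int × Int × Int) k =>
        let c := PySem.Int.floordiv (s.2.1 * ((xs.length : Int) - k + 1)) k
        (s.1 + s.2.2 * c * PySem.List.pyGetD xs ((xs.length : Int) - k) 0, c, -s.2.2))
      (0, 1, 1)
    = (∑ k ∈ Finset.range j,
        (-1 : ℤ) ^ k * (xs.length.choose (k + 1) : ℤ) * xs.getD (xs.length - 1 - k) 0,
       (xs.length.choose j : ℤ), (-1 : ℤ) ^ j) := by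
  induction j with
  | zero =>
    rw [PySem.List.pyRange_one_eq_nil (by norm_num)]
    simp
  | succ j ih =>
    have hj' : j ≤ xs.length := by omega
    rw [show ((j + 1 : ℕ) : Int) + 1 = ((j : Int) + 1) + 1 by push_cast; ring,
        PySem.List.pyRange_one_succ_right (by omega : (1 : Int) ≤ (j : Int) + 1),
        List.foldl_append, ih hj']
    simp only [List.foldl_cons, List.foldl_nil]
    set n := xs.length with hnn
    -- the new coefficient is C(n, j+1)
    have hnum : ((n.choose j : ℤ)) * ((n : Int) - ((j : Int) + 1) + 1)
        = ((n.choose (j + 1) * (j + 1) : ℕ) : Int) := by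
      have h1 : (n : Int) - ((j : Int) + 1) + 1 = ((n - j : ℕ) : Int) := by
        push_cast [Nat.cast_sub hj']; ring
      rw [h1, ← Nat.cast_mul, ← Nat.choose_succ_right_eq, Nat.cast_mul]
    have hc : PySem.Int.floordiv ((n.choose j : ℤ) * ((n : Int) - ((j : Int) + 1) + 1))
        ((j : Int) + 1) = (n.choose (j + 1) : ℤ) := by
      rw [hnum, show ((j : Int) + 1) = ((j + 1 : ℕ) : Int) by push_cast; ring,
          PySem.Int.floordiv_natCast]
      norm_num [Nat.mul_div_cancel]
    have hidx : PySem.List.pyGetD xs ((n : Int) - ((j : Int) + 1)) 0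
        = xs.getD (n - 1 - j) 0 := by
      have h1 : (n : Int) - ((j : Int) + 1) = ((n - 1 - j : ℕ) : Int) := by
        omega
      rw [h1, PySem.List.pyGetD_natCast]
    simp only [hc, hidx, Prod.mk.injEq]
    refine ⟨?_, trivial, ?_⟩
    · simp only [Finset.sum_range_succ]
    · simp [pow_succ]

lemma calcNextValue_alt_eq_binomSum (xs : List Int) : calcNextValue_alt xs = binomSum xs := by
  unfold calcNextValue_alt
  show ((PySem.List.pyRange 1 ((xs.length : Int) + 1) 1).foldl
      (fun (s : Int × Int × Int) k =>
        let c := PySem.Int.floordiv (s.2.1 * ((xs.length : Int) - k + 1)) k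
        (s.1 + s.2.2 * c * PySem.List.pyGetD xs ((xs.length : Int) - k) 0, c, -s.2.2))
      (0, 1, 1)).1 = binomSum xs
  rw [alt_inv xs xs.length le_rfl]
  rfl

-- ===== VERDICT (by name: the statement is the Claim_ definition above) =====
theorem calcNextValue_spec : Claim_equal_calcNextValue := by
  intro xs _
  unfold Spec_calcNextValue
  rw [calcNextValue_eq_binomSum, calcNextValue_alt_eq_binomSum]
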